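-- pv_equiv track=rewrite | github.com/bishalpanthi111/python-data-structure-algorithm | Data Structures & Algorithms with Python Module 4 Homework.py | undo_actions
-- ===== SOURCE A (Python) =====
-- def undo_actions(stack, n):
--     undone = []
--
--     for _ in range(n):
--         if not stack:   # Check if stack is empty
--             break
--
--         action = stack.pop()
--         undone.append(action)
--
--     return undone, stack
-- ===== SOURCE B (Python) =====
-- def undo_actions(stack, n):
--     # Equivalence is about the return value; both A and B also mutate `stack`
--     # in place by removing the same k last elements.
--     k = max(0, min(n, len(stack)))
--     m = len(stack) - k
--     undone = stack[m:][::-1]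
--     del stack[m:]
--     return undone, stack
-- ===== Notes on version B (the rewrite author's own statement) =====
-- stated objective: simpler
-- what changed: Replaces the iterate-and-pop loop with computing k = max(0, min(n, len(stack))) up front and doing one reversed slice plus one del of the suffix.
import Mathlib
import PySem

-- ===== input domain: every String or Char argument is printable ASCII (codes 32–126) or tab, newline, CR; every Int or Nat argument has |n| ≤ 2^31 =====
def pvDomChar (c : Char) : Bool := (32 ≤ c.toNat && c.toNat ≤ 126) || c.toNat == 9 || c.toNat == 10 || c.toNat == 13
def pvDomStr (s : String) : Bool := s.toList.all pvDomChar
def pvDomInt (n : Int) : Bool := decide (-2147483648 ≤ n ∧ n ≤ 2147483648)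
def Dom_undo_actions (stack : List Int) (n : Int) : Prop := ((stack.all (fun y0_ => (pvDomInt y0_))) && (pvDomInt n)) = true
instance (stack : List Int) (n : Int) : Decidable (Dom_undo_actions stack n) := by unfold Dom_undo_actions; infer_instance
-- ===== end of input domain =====

-- B replaces A's iterate-and-pop loop by computing k = max(0, min(n, len(stack))) and
-- taking/dropping the suffix with one reversed slice (simpler; return-value equivalence —
-- both Pythons mutate `stack` in place, removing the same suffix).


-- ===== PORT A =====
-- for _ in range(n): if not stack: break; undone.append(stack.pop())
def pvUndoGo (stack undone : List Int) : Nat → List Int × List Int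
  | 0 => (undone, stack)
  | f+1 =>
    if h : stack = [] then (undone, stack)
    else pvUndoGo stack.dropLast (undone ++ [stack.getLast h]) f

def undo_actions (stack : List Int) (n : Int) : List Int × List Int :=
  pvUndoGo stack [] n.toNat

-- ===== PORT B =====
def undo_actions_alt (stack : List Int) (n : Int) : List Int × List Int :=
  let k : Int := max 0 (min n (stack.length : Int))
  let m : Nat := stack.length - k.toNat
  ((stack.drop m).reverse, stack.take m)

-- ===== PRECONDITION & SPEC =====
def Spec_undo_actions (stack : List Int) (n : Int) (out : List Int × List Int) : Prop := out = undo_actions_alt stack n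
instance (stack : List Int) (n : Int) (out : List Int × List Int) : Decidable (Spec_undo_actions stack n out) := by unfold Spec_undo_actions; infer_instance

-- ===== CLAIM (what is proved, stated in full; the proofs are below) =====
def Claim_equal_undo_actions : Prop := ∀ (stack : List Int) (n : Int), Dom_undo_actions stack n → Spec_undo_actions stack n (undo_actions stack n)

-- ===== LEMMAS AND PROOFS =====

theorem pvUndoGo_eq (fuel : Nat) : ∀ (stack undone : List Int),
    pvUndoGo stack undone fuel =
      (undone ++ (stack.drop (stack.length - min fuel stack.length)).reverse,
       stack.take (stack.length - min fuel stack.length)) := by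
  induction fuel with
  | zero =>
    intro stack undone
    simp [pvUndoGo]
  | succ f ih =>
    intro stack undone
    induction stack using List.reverseRecOn with
    | nil => simp [pvUndoGo]
    | append_singleton ys a _ =>
      have hne : ys ++ [a] ≠ [] := by simp
      rw [pvUndoGo, dif_neg hne]
      simp only [List.dropLast_concat, List.getLast_append_singleton]
      rw [ih]
      have hlen : (ys ++ [a]).length = ys.length + 1 := by simp
      rcases le_or_gt ys.length f with hf | hf
      · have h1 : ys.length - min f ys.length = 0 := by omega
        have h2 : (ys ++ [a]).length - min (f+1) (ys ++ [a]).length = 0 := by omega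
        simp [h1]
      · have h1 : ys.length - min f ys.length = ys.length - f := by omega
        have h2 : (ys ++ [a]).length - min (f+1) (ys ++ [a]).length = ys.length - f := by omega
        have hle : ys.length - f ≤ ys.length := by omega
        rw [h1, h2, List.drop_append_of_le_length hle, List.take_append_of_le_length hle]
        simp

theorem undo_actions_spec : Claim_equal_undo_actions := by
  intro stack n _
  unfold Spec_undo_actions undo_actions undo_actions_alt
  rw [pvUndoGo_eq]
  have : stack.length - (max 0 (min n (stack.length : Int))).toNat
       = stack.length - min n.toNat stack.length := by omega
  simp [this]
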